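-- pv_equiv track=rewrite | github.com/sdsmall/wikipython | code.py | tag_string_to_array
-- ===== SOURCE A (Python) =====
-- def tag_string_to_array(str):
--   tag_array = []
--   hashtag_found = False
--   curr = ""
--   for c in str:
--     if c=='#':
--       hashtag_found = True
--     elif c==' ':
--       length = curr.__len__()
--       if length>0:
--         tag_array.append(curr)
--         curr = ""
--       hashtag_found = False
--     elif hashtag_found == True:
--       curr += c
--   if curr.__len__()>0 and hashtag_found==True:
--     tag_array.append(curr)
--   return tag_array
-- ===== SOURCE B (Python) =====
-- def tag_string_to_array(str):
--   out = []
--   for token in str.split(' '):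
--     parts = token.split('#')
--     if len(parts) > 1:
--       tag = ''.join(parts[1:])
--       if tag:
--         out.append(tag)
--   return out
-- ===== Notes on version B (the rewrite author's own statement) =====
-- stated objective: simpler
-- what changed: Replaces A's flag-driven per-character state machine (hashtag_found/curr) with a two-stage tokenize-then-extract pass: split the string on spaces, then per token split on '#' and join everything after the first '#'.
import Mathlib
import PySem

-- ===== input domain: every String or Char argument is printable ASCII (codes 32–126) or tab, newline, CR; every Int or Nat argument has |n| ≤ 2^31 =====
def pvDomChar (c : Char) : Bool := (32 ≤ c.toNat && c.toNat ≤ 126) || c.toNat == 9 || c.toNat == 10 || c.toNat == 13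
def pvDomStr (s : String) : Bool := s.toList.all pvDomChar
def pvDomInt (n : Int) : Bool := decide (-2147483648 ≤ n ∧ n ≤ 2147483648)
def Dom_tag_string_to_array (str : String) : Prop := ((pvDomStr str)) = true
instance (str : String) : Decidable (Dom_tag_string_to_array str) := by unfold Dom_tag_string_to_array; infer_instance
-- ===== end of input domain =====

-- B replaces A's flag-driven character state machine by split-on-space, then split-on-'#' per token (objective: simpler).

-- ===== PORT A =====
-- the for-loop over the characters, state (tag_array, hashtag_found, curr); the trailing flush is the base case
def tagLoopA : List Char → List String → Bool → List Char → List String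
  | [], ta, hf, curr => if curr.length > 0 && hf then ta ++ [String.ofList curr] else ta
  | c :: rest, ta, hf, curr =>
    if c = '#' then tagLoopA rest ta true curr
    else if c = ' ' then
      if curr.length > 0 then tagLoopA rest (ta ++ [String.ofList curr]) false []
      else tagLoopA rest ta false curr
    else if hf then tagLoopA rest ta hf (curr ++ [c])
    else tagLoopA rest ta hf curr

def tag_string_to_array (str : String) : List String := tagLoopA str.toList [] false []

-- ===== PORT B =====
-- str.split(' ') = PySem.Chars.splitOn · [' ']; token.split('#') likewise; ''.join(parts[1:]) = PySem.Chars.join []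
def tag_string_to_array_alt (str : String) : List String :=
  (PySem.Chars.splitOn str.toList [' ']).foldl (fun out token =>
    let parts := PySem.Chars.splitOn token ['#']
    if parts.length > 1 then
      let tag := PySem.Chars.join [] (parts.drop 1)
      if tag ≠ [] then out ++ [String.ofList tag] else out
    else out) []

-- ===== PRECONDITION & SPEC =====
def Spec_tag_string_to_array (str : String) (out : List String) : Prop := out = tag_string_to_array_alt str
instance (str : String) (out : List String) : Decidable (Spec_tag_string_to_array str out) := by unfold Spec_tag_string_to_array; infer_instance

-- ===== CLAIM (what is proved, stated in full; the proofs are below) =====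
def Claim_equal_tag_string_to_array : Prop := ∀ (str : String), Dom_tag_string_to_array str → Spec_tag_string_to_array str (tag_string_to_array str)

-- ===== LEMMAS AND PROOFS =====

-- reference split on a single-character separator: (first piece, remaining pieces)
def splitC (sep : Char) : List Char → List Char × List (List Char)
  | [] => ([], [])
  | c :: r => if c = sep then ([], (splitC sep r).1 :: (splitC sep r).2)
              else (c :: (splitC sep r).1, (splitC sep r).2)

lemma splitOn_go_spec (sep : Char) : ∀ (fuel : Nat) (l cur : List Char) (acc : List (List Char)),
    l.length ≤ fuel →
    PySem.Chars.splitOn.go [sep] fuel l cur acc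
      = acc.reverse ++ (cur.reverse ++ (splitC sep l).1) :: (splitC sep l).2 := by
  intro fuel
  induction fuel with
  | zero =>
    intro l cur acc h
    have : l = [] := by cases l <;> simp_all
    subst this
    rw [PySem.Chars.splitOn.go.eq_def]
    simp [splitC]
  | succ n ih =>
    intro l cur acc h
    cases l with
    | nil => rw [PySem.Chars.splitOn.go.eq_def]; simp [splitC]
    | cons c rest =>
      rw [PySem.Chars.splitOn.go.eq_def]
      simp only [List.isPrefixOf, Bool.and_true, List.length_cons, List.length_nil,
        Nat.zero_add, List.drop_succ_cons, List.drop_zero]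
      by_cases hc : sep = c
      · rw [if_pos (by simp [hc])]
        rw [ih rest [] (cur.reverse :: acc) (by simp at h; omega)]
        simp [splitC, hc.symm]
      · rw [if_neg (by simp [hc])]
        rw [ih rest (c :: cur) acc (by simp at h; omega)]
        have : ¬ (c = sep) := fun h' => hc h'.symm
        simp [splitC, this]

lemma splitOn_single (sep : Char) (l : List Char) :
    PySem.Chars.splitOn l [sep] = (splitC sep l).1 :: (splitC sep l).2 := by
  unfold PySem.Chars.splitOn
  rw [splitOn_go_spec sep (l.length + 1) l [] [] (by omega)]
  simp

-- what A accumulates into curr over the remaining characters of one token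
def emit : Bool → List Char → List Char → List Char
  | _, curr, [] => curr
  | hf, curr, c :: r => if c = '#' then emit true curr r
      else if hf then emit hf (curr ++ [c]) r else emit hf curr r

-- A's loop without the tag_array accumulator
def ref : List Char → Bool → List Char → List String
  | [], hf, curr => if curr.length > 0 && hf then [String.ofList curr] else []
  | c :: rest, hf, curr =>
    if c = '#' then ref rest true curr
    else if c = ' ' then (if curr.length > 0 then [String.ofList curr] else []) ++ ref rest false []
    else if hf then ref rest hf (curr ++ [c]) else ref rest hf curr

lemma tagLoopA_acc : ∀ (l : List Char) (ta : List String) (hf : Bool) (curr : List Char),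
    tagLoopA l ta hf curr = ta ++ ref l hf curr := by
  intro l
  induction l with
  | nil => intro ta hf curr; simp only [tagLoopA, ref]; split <;> simp
  | cons c rest ih =>
    intro ta hf curr
    simp only [tagLoopA, ref]
    split_ifs with h1 h2 h3 <;> simp [ih] <;>
      first
      | rfl
      | (have hc : curr = [] := by simpa using h3
         simp [hc])

-- B's value for one space-delimited token
def tokV (t : List Char) : List Char := ((splitC '#' t).2).flatten

lemma emit_true (t : List Char) : ∀ (curr : List Char),
    emit true curr t = curr ++ (splitC '#' t).1 ++ tokV t := by
  induction t with
  | nil => intro curr; simp [emit, splitC, tokV]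
  | cons c r ih =>
    intro curr
    by_cases hc : c = '#'
    · subst hc; simp [emit, splitC, tokV, ih]
    · simp [emit, splitC, tokV, hc, ih]

lemma emit_false (t : List Char) : emit false [] t = tokV t := by
  induction t with
  | nil => simp [emit, tokV, splitC]
  | cons c r ih =>
    by_cases hc : c = '#'
    · subst hc; simp [emit, tokV, splitC, emit_true]
    · simp [emit, tokV, splitC, hc]; simpa [tokV] using ih

def tokOut (t : List Char) : List String :=
  if tokV t ≠ [] then [String.ofList (tokV t)] else []

lemma ref_eq : ∀ (l : List Char) (hf : Bool) (curr : List Char), (curr = [] ∨ hf = true) →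
    ref l hf curr =
      (if emit hf curr (splitC ' ' l).1 ≠ [] then [String.ofList (emit hf curr (splitC ' ' l).1)] else [])
      ++ ((splitC ' ' l).2).flatMap tokOut := by
  intro l
  induction l with
  | nil =>
    intro hf curr h
    simp only [ref, splitC, emit]
    rcases h with h | h
    · subst h; simp
    · subst h
      rcases curr with _ | ⟨c, cs⟩ <;> simp
  | cons c rest ih =>
    intro hf curr h
    by_cases hc : c = '#'
    · subst hc
      simp only [ref]
      rw [ih true curr (Or.inr rfl)]
      simp [splitC, emit]
    · by_cases hs : c = ' '
      · subst hs
        simp only [ref, if_neg hc]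
        rw [ih false [] (Or.inl rfl)]
        have hspl : splitC ' ' (' ' :: rest) = ([], (splitC ' ' rest).1 :: (splitC ' ' rest).2) := by
          simp [splitC]
        rw [hspl]
        simp only [emit, List.flatMap_cons]
        rw [emit_false]
        rcases curr with _ | ⟨a, as⟩ <;> simp [tokOut]
      · have hspl : splitC ' ' (c :: rest) = (c :: (splitC ' ' rest).1, (splitC ' ' rest).2) := by
          simp [splitC, hs]
        by_cases hhf : hf = true
        · subst hhf
          simp only [ref, if_neg hc, if_neg hs]
          rw [ih true (curr ++ [c]) (Or.inr rfl)]
          rw [hspl]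
          simp [emit, hc]
        · have hf0 : hf = false := by cases hf <;> simp_all
          subst hf0
          simp only [ref, if_neg hc, if_neg hs, Bool.false_eq_true, if_false]
          rw [ih false curr h]
          rw [hspl]
          simp [emit, hc]

lemma join_nil_flatten (ps : List (List Char)) : PySem.Chars.join [] ps = ps.flatten := by
  induction ps with
  | nil => rfl
  | cons p ps ih =>
    cases ps with
    | nil => simp [PySem.Chars.join, List.intercalate]
    | cons q qs =>
      rw [PySem.Chars.join_cons_cons, ih]
      simp

lemma foldl_stepB : ∀ (ts : List (List Char)) (out : List String),
    ts.foldl (fun out token =>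
      let parts := PySem.Chars.splitOn token ['#']
      if parts.length > 1 then
        let tag := PySem.Chars.join [] (parts.drop 1)
        if tag ≠ [] then out ++ [String.ofList tag] else out
      else out) out
    = out ++ ts.flatMap tokOut := by
  intro ts
  induction ts with
  | nil => intro out; simp
  | cons t ts ih =>
    intro out
    simp only [List.foldl_cons, List.flatMap_cons, ih]
    have hstep : (let parts := PySem.Chars.splitOn t ['#']
        if parts.length > 1 then
          let tag := PySem.Chars.join [] (parts.drop 1)
          if tag ≠ [] then out ++ [String.ofList tag] else out
        else out) = out ++ tokOut t := by
      rw [splitOn_single '#' t]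
      simp only [List.length_cons, List.drop_one, List.tail_cons]
      rw [join_nil_flatten]
      by_cases h2 : (splitC '#' t).2 = []
      · simp [h2, tokOut, tokV]
      · have : ((splitC '#' t).2).length > 0 := by
          cases h' : (splitC '#' t).2 <;> simp_all
        rw [if_pos (by omega)]
        simp only [tokOut, tokV]
        split_ifs <;> simp_all
    rw [hstep]
    simp

-- ===== VERDICT (by name: the statement is the Claim_ definition above) =====
theorem tag_string_to_array_spec : Claim_equal_tag_string_to_array := by
  intro str _
  unfold Spec_tag_string_to_array tag_string_to_array tag_string_to_array_alt
  rw [tagLoopA_acc, ref_eq str.toList false [] (Or.inl rfl)]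
  rw [splitOn_single ' ' str.toList, foldl_stepB]
  rw [emit_false]
  simp [tokOut]
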